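-- pv_equiv track=rewrite | github.com/emorynlp/TranscriptSynth | src/talign.py | align4d_to_whisper
-- ===== SOURCE A (Python) =====
-- def align4d_to_whisper(w_tokens: list[str], a_tokens: list[str]) -> dict[int, int]:
--     maps, idx = dict(), 0
--     for w_idx, w_token in enumerate(w_tokens):
--         for a_idx in range(idx, len(a_tokens)):
--             if w_token == a_tokens[a_idx]:
--                 maps[a_idx] = w_idx
--                 idx = a_idx + 1
--                 break
--     return maps
-- ===== SOURCE B (Python) =====
-- def align4d_to_whisper(w_tokens: list[str], a_tokens: list[str]) -> dict[int, int]: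
--     # Index each token to its (sorted) positions once, then binary-search for
--     # the first position >= idx instead of rescanning a_tokens per w_token.
--     positions = {}
--     for i, t in enumerate(a_tokens):
--         positions.setdefault(t, []).append(i)
--     maps, idx = {}, 0
--     for w_idx, w_token in enumerate(w_tokens):
--         lst = positions.get(w_token, [])
--         lo, hi = 0, len(lst)
--         while lo < hi:
--             mid = (lo + hi) // 2
--             if lst[mid] < idx:
--                 lo = mid + 1
--             else:
--                 hi = mid
--         if lo < len(lst):
--             j = lst[lo]
--             maps[j] = w_idx
--             idx = j + 1
--     return maps
-- ===== Notes on version B (the rewrite author's own statement) =====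
-- stated objective: faster
-- what changed: B precomputes a dict mapping each token to its sorted list of positions in a_tokens and then, per w_token, binary-searches that list for the first position >= idx, replacing A's linear rescan of a_tokens for every w_token.
import Mathlib
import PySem

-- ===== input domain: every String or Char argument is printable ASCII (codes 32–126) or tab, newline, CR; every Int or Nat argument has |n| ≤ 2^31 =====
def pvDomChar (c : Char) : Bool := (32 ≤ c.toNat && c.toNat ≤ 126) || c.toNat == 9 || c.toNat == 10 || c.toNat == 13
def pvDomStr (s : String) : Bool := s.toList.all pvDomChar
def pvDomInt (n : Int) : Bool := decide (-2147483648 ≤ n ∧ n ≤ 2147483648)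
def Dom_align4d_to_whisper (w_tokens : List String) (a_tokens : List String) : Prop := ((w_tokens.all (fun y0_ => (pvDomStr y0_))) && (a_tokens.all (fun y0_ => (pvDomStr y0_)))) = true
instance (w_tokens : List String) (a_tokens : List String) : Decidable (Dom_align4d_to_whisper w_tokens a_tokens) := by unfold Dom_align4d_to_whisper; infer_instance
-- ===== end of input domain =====

-- B replaces A's per-w_token linear rescan of a_tokens by a precomputed
-- token → positions index plus a hand-written binary search for the first position ≥ idx.

-- ===== PORT A =====
-- inner loop 'for a_idx in range(idx, len(a_tokens)): if w_token == a_tokens[a_idx]: … break'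
-- (indices drawn from the range are always in bounds, so pyGetD with default "" is exact there)
def pvAInner (a : List String) (t : String) : List Int → Option Int
  | [] => none
  | i :: rest => if t == PySem.List.pyGetD a i "" then some i else pvAInner a t rest

def align4d_to_whisper (w_tokens : List String) (a_tokens : List String) : List (Int × Int) :=
  ((PySem.List.enumerate w_tokens 0).foldl
    (fun s p =>
      match pvAInner a_tokens p.2 (PySem.List.pyRange s.2 (a_tokens.length : Int) 1) with
      | some j => (s.1.insert j p.1, j + 1)
      | none => s)
    ((PySem.Dict.empty : PySem.Dict Int Int), (0 : Int))).1.items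

-- ===== PORT B =====
-- 'while lo < hi: mid = (lo + hi) // 2; …' — lo, hi stay nonnegative, so Nat division is exact;
-- lst[mid] has 0 ≤ mid < len(lst), so getD 0 is exact there
def pvBSearch (lst : List Int) (x : Int) (lo hi : Nat) : Nat :=
  if lo < hi then
    let mid := (lo + hi) / 2
    if lst.getD mid 0 < x then pvBSearch lst x (mid + 1) hi else pvBSearch lst x lo mid
  else lo
termination_by hi - lo
decreasing_by all_goals omega

def align4d_to_whisper_alt (w_tokens : List String) (a_tokens : List String) : List (Int × Int) :=
  let positions := (PySem.List.enumerate a_tokens 0).foldl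
    (fun d p => d.modify p.2 [] (· ++ [p.1])) (PySem.Dict.empty : PySem.Dict String (List Int))
  ((PySem.List.enumerate w_tokens 0).foldl
    (fun s p =>
      let lst := positions.getD p.2 []
      let lo := pvBSearch lst s.2 0 lst.length
      if lo < lst.length then (s.1.insert (lst.getD lo 0) p.1, lst.getD lo 0 + 1) else s)
    ((PySem.Dict.empty : PySem.Dict Int Int), (0 : Int))).1.items

-- ===== PRECONDITION & SPEC =====
def Spec_align4d_to_whisper (w_tokens : List String) (a_tokens : List String) (out : List (Int × Int)) : Prop := out = align4d_to_whisper_alt w_tokens a_tokens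
instance (w_tokens : List String) (a_tokens : List String) (out : List (Int × Int)) : Decidable (Spec_align4d_to_whisper w_tokens a_tokens out) := by unfold Spec_align4d_to_whisper; infer_instance

-- ===== CLAIM (what is proved, stated in full; the proofs are below) =====
def Claim_equal_align4d_to_whisper : Prop := ∀ (w_tokens : List String) (a_tokens : List String), Dom_align4d_to_whisper w_tokens a_tokens → Spec_align4d_to_whisper w_tokens a_tokens (align4d_to_whisper w_tokens a_tokens)

-- ===== LEMMAS AND PROOFS =====

-- the positions of token t in a, as Ints, in increasing order
def pvPosL (a : List String) (t : String) : List Int :=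
  ((PySem.List.enumerate a 0).filter (fun p => p.2 == t)).map (·.1)

lemma pvPosL_eq_getD (a : List String) (t : String) :
    ((PySem.List.enumerate a 0).foldl (fun d p => d.modify p.2 [] (· ++ [p.1]))
      (PySem.Dict.empty : PySem.Dict String (List Int))).getD t [] = pvPosL a t := by
  have h : ∀ (L : List (Int × String)) (d : PySem.Dict String (List Int)),
      (L.foldl (fun d p => d.modify p.2 [] (· ++ [p.1])) d)
      = ((L.map (fun p => (p.2, p.1))).foldl (fun d q => d.modify q.1 [] (· ++ [q.2])) d) := by
    intro L d
    rw [List.foldl_map]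
  rw [h, PySem.Dict.getD_foldl_modify_append]
  simp [pvPosL, List.filter_map, Function.comp_def]

lemma pvPosL_mem (a : List String) (t : String) (x : Int) :
    x ∈ pvPosL a t ↔ ∃ (k : Nat) (hk : k < a.length), x = (k : Int) ∧ a[k] = t := by
  simp only [pvPosL, List.mem_map, List.mem_filter, PySem.List.mem_enumerate_iff]
  constructor
  · rintro ⟨p, ⟨⟨k, hk, rfl⟩, hpt⟩, rfl⟩
    exact ⟨k, hk, by simp, by simpa using hpt⟩
  · rintro ⟨k, hk, rfl, ht⟩
    exact ⟨((k : Int), a[k]), ⟨⟨k, hk, by simp⟩, by simpa using ht⟩, rfl⟩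

lemma pvPosL_sorted (a : List String) (t : String) : (pvPosL a t).Pairwise (· < ·) := by
  have h1 := PySem.List.pairwise_lt_enumerate (xs := a) (s := 0)
  exact List.pairwise_map.mpr (List.Pairwise.filter _ h1)

-- boundary spec of B's hand-written binary search
lemma pvBSearch_spec (lst : List Int) (x : Int) (hs : lst.Pairwise (· ≤ ·)) (lo hi : Nat)
    (hlohi : lo ≤ hi) (hhi : hi ≤ lst.length)
    (hlo : ∀ j (hj : j < lst.length), j < lo → lst[j] < x)
    (hhi2 : ∀ j (hj : j < lst.length), hi ≤ j → x ≤ lst[j]) :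
    pvBSearch lst x lo hi ≤ lst.length ∧
      (∀ j (hj : j < lst.length), j < pvBSearch lst x lo hi → lst[j] < x) ∧
      (∀ j (hj : j < lst.length), pvBSearch lst x lo hi ≤ j → x ≤ lst[j]) := by
  have hmono : ∀ (i j : Nat) (hi' : i < lst.length) (hj : j < lst.length), i ≤ j →
      lst[i] ≤ lst[j] := by
    intro i j hi' hj hij
    rcases Nat.lt_or_ge i j with h | h
    · exact (List.pairwise_iff_getElem.mp hs) i j hi' hj h
    · have : i = j := by omega
      subst this; exact le_rfl
  have main : ∀ n lo hi, hi - lo = n → lo ≤ hi → hi ≤ lst.length →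
      (∀ j (hj : j < lst.length), j < lo → lst[j] < x) →
      (∀ j (hj : j < lst.length), hi ≤ j → x ≤ lst[j]) →
      pvBSearch lst x lo hi ≤ lst.length ∧
        (∀ j (hj : j < lst.length), j < pvBSearch lst x lo hi → lst[j] < x) ∧
        (∀ j (hj : j < lst.length), pvBSearch lst x lo hi ≤ j → x ≤ lst[j]) := by
    intro n
    induction n using Nat.strong_induction_on with
    | _ n ih =>
      intro lo hi hn hlohi hhi hlo hhi2
      rw [pvBSearch]
      by_cases h : lo < hi
      · simp only [if_pos h]
        have hmid1 : lo ≤ (lo + hi) / 2 := by omega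
        have hmid2 : (lo + hi) / 2 < hi := by omega
        have hmlt : (lo + hi) / 2 < lst.length := by omega
        have hg : lst.getD ((lo + hi) / 2) 0 = lst[(lo + hi) / 2] := List.getD_eq_getElem _ _ hmlt
        by_cases hc : lst.getD ((lo + hi) / 2) 0 < x
        · simp only [if_pos hc]
          refine ih (hi - ((lo + hi) / 2 + 1)) (by omega) _ _ rfl (by omega) hhi ?_ hhi2
          intro j hj hjlt
          calc lst[j] ≤ lst[(lo + hi) / 2] := hmono j _ hj hmlt (by omega)
            _ < x := by rw [← hg]; exact hc
        · simp only [if_neg hc]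
          refine ih (((lo + hi) / 2) - lo) (by omega) _ _ rfl (by omega) (by omega) hlo ?_
          intro j hj hjge
          calc x ≤ lst[(lo + hi) / 2] := by rw [← hg]; omega
            _ ≤ lst[j] := hmono _ j hmlt hj hjge
      · simp only [if_neg h]
        exact ⟨by omega, fun j hj hjlt => hlo j hj hjlt, fun j hj hjge => hhi2 j hj (by omega)⟩
  exact main (hi - lo) lo hi rfl hlohi hhi hlo hhi2

-- first element ≥ x of a list (the value both programs' inner searches produce)
def pvFirstGE (lst : List Int) (x : Int) : Option Int := (lst.filter (fun p => x ≤ p)).head?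

lemma pvFirstGE_of_bounds (lst : List Int) (x : Int) (k : Nat) (hk : k ≤ lst.length)
    (h1 : ∀ j (hj : j < lst.length), j < k → lst[j] < x)
    (h2 : ∀ j (hj : j < lst.length), k ≤ j → x ≤ lst[j]) :
    pvFirstGE lst x = lst[k]? := by
  unfold pvFirstGE
  conv_lhs => rw [← List.take_append_drop k lst]
  rw [List.filter_append]
  have ht : (lst.take k).filter (fun p => x ≤ p) = [] := by
    rw [List.filter_eq_nil_iff]
    intro p hp
    rw [List.mem_iff_getElem] at hp
    obtain ⟨j, hj, rfl⟩ := hp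
    have hjl : j < k := lt_of_lt_of_le hj (List.length_take_le k lst)
    have hjL : j < lst.length := by omega
    rw [List.getElem_take]
    simpa using not_le.mpr (h1 j hjL hjl)
  have hd : (lst.drop k).filter (fun p => x ≤ p) = lst.drop k := by
    rw [List.filter_eq_self]
    intro p hp
    rw [List.mem_iff_getElem] at hp
    obtain ⟨j, hj, rfl⟩ := hp
    have hjL : k + j < lst.length := by
      have := hj; rw [List.length_drop] at this; omega
    rw [List.getElem_drop]
    simpa using h2 (k + j) hjL (by omega)
  rw [ht, hd, List.nil_append, List.head?_drop]

lemma pvB_step_eq_firstGE (lst : List Int) (x : Int) (hs : lst.Pairwise (· < ·)) :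
    (if pvBSearch lst x 0 lst.length < lst.length
       then some (lst.getD (pvBSearch lst x 0 lst.length) 0) else none) = pvFirstGE lst x := by
  have hle : lst.Pairwise (· ≤ ·) := hs.imp (fun h => le_of_lt h)
  obtain ⟨hk, h1, h2⟩ := pvBSearch_spec lst x hle 0 lst.length (Nat.zero_le _) le_rfl
    (by omega) (fun j hj hge => absurd hj (by omega))
  rw [pvFirstGE_of_bounds lst x _ hk h1 h2]
  by_cases h : pvBSearch lst x 0 lst.length < lst.length
  · rw [if_pos h, List.getElem?_eq_getElem h, List.getD_eq_getElem _ _ h]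
  · rw [if_neg h, eq_comm, List.getElem?_eq_none_iff]
    omega

lemma pvFirstGE_self (lst : List Int) (x : Int) (hs : lst.Pairwise (· < ·)) (hx : x ∈ lst) :
    pvFirstGE lst x = some x := by
  induction lst with
  | nil => simp at hx
  | cons y rest ih =>
    rcases List.pairwise_cons.mp hs with ⟨hy, hrest⟩
    unfold pvFirstGE
    by_cases hxy : y = x
    · subst hxy; simp
    · have hxr : x ∈ rest := by
        rcases List.mem_cons.mp hx with h | h
        · exact absurd h.symm hxy
        · exact h
      have : y < x := hy x hxr
      rw [List.filter_cons]
      simp only [not_le.mpr this, decide_false]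
      exact ih hrest hxr

lemma pvFirstGE_shift (lst : List Int) (x : Int) (hx : x ∉ lst) :
    pvFirstGE lst x = pvFirstGE lst (x + 1) := by
  unfold pvFirstGE
  congr 1
  apply List.filter_congr
  intro p hp
  have : p ≠ x := fun h => hx (h ▸ hp)
  simp only [decide_eq_decide]
  omega

lemma pvFirstGE_mem (lst : List Int) (x j : Int) (h : pvFirstGE lst x = some j) : j ∈ lst := by
  unfold pvFirstGE at h
  exact List.mem_of_mem_filter (List.mem_of_mem_head? h)

lemma pvA_inner_eq_firstGE (a : List String) (t : String) (idx : Nat) :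
    pvAInner a t (PySem.List.pyRange (idx : Int) (a.length : Int) 1) = pvFirstGE (pvPosL a t) idx := by
  have main : ∀ n idx, a.length - idx = n →
      pvAInner a t (PySem.List.pyRange (idx : Int) (a.length : Int) 1) = pvFirstGE (pvPosL a t) idx := by
    intro n
    induction n with
    | zero =>
      intro idx hn
      have hge : a.length ≤ idx := by omega
      rw [PySem.List.pyRange_one_eq_nil (by exact_mod_cast hge)]
      unfold pvAInner pvFirstGE
      have : (pvPosL a t).filter (fun p => (idx : Int) ≤ p) = [] := by
        rw [List.filter_eq_nil_iff]
        intro p hp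
        obtain ⟨k, hk, rfl, _⟩ := (pvPosL_mem a t p).mp hp
        simp only [decide_eq_true_eq, not_le]
        exact_mod_cast lt_of_lt_of_le hk hge
      rw [this]; rfl
    | succ n ih =>
      intro idx hn
      rcases Nat.lt_or_ge idx a.length with hlt | hge
      · rw [PySem.List.pyRange_one_cons (by exact_mod_cast hlt)]
        unfold pvAInner
        have hget : PySem.List.pyGetD a (idx : Int) "" = a[idx] := by
          simp [PySem.List.pyGetD_natCast, List.getD_eq_getElem?_getD, List.getElem?_eq_getElem hlt]
        rw [hget]
        by_cases heq : t == a[idx]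
        · rw [if_pos heq]
          have hmem : (idx : Int) ∈ pvPosL a t := by
            rw [pvPosL_mem]
            exact ⟨idx, hlt, rfl, (beq_iff_eq.mp heq).symm⟩
          exact (pvFirstGE_self _ _ (pvPosL_sorted a t) hmem).symm
        · rw [if_neg heq]
          have hnm : (idx : Int) ∉ pvPosL a t := by
            rw [pvPosL_mem]
            rintro ⟨k, hk, hke, hkt⟩
            have : k = idx := by exact_mod_cast hke.symm
            subst this
            exact heq (beq_iff_eq.mpr hkt.symm)
          have hcast : (idx : Int) + 1 = ((idx + 1 : Nat) : Int) := by push_cast; ring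
          rw [hcast, ih (idx + 1) (by omega), ← hcast, ← pvFirstGE_shift _ _ hnm]
      · omega
  exact main (a.length - idx) idx rfl

theorem align4d_to_whisper_spec : Claim_equal_align4d_to_whisper := by
  intro w a _hdom
  unfold Spec_align4d_to_whisper align4d_to_whisper align4d_to_whisper_alt
  congr 1
  have hfold : ∀ (L : List (Int × String)) (d : PySem.Dict Int Int) (x : Int), (∃ k : Nat, x = (k : Int)) →
      L.foldl (fun s p =>
          match pvAInner a p.2 (PySem.List.pyRange s.2 (a.length : Int) 1) with
          | some j => (s.1.insert j p.1, j + 1)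
          | none => s) (d, x)
      = L.foldl (fun s p =>
          let lst := ((PySem.List.enumerate a 0).foldl
            (fun d p => d.modify p.2 [] (· ++ [p.1]))
            (PySem.Dict.empty : PySem.Dict String (List Int))).getD p.2 []
          let lo := pvBSearch lst s.2 0 lst.length
          if lo < lst.length then (s.1.insert (lst.getD lo 0) p.1, lst.getD lo 0 + 1) else s)
          (d, x) := by
    intro L
    induction L with
    | nil => intro d x _; rfl
    | cons p L ih =>
      rintro d x ⟨k, rfl⟩
      simp only [List.foldl_cons]
      have hA : pvAInner a p.2 (PySem.List.pyRange ((k : Int)) (a.length : Int) 1)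
          = pvFirstGE (pvPosL a p.2) k := pvA_inner_eq_firstGE a p.2 k
      have hB := pvB_step_eq_firstGE (pvPosL a p.2) k (pvPosL_sorted a p.2)
      rw [pvPosL_eq_getD a p.2] at *
      cases hfge : pvFirstGE (pvPosL a p.2) (k : Int) with
      | none =>
        rw [hfge] at hA hB
        simp only [hA]
        by_cases h : pvBSearch (pvPosL a p.2) (k : Int) 0 (pvPosL a p.2).length < (pvPosL a p.2).length
        · rw [if_pos h] at hB; exact absurd hB (by simp)
        · rw [if_neg h]
          exact ih d (k : Int) ⟨k, rfl⟩
      | some j =>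
        rw [hfge] at hA hB
        obtain ⟨k', hk', hje, _⟩ := (pvPosL_mem a p.2 j).mp (pvFirstGE_mem _ _ _ hfge)
        simp only [hA]
        by_cases h : pvBSearch (pvPosL a p.2) (k : Int) 0 (pvPosL a p.2).length < (pvPosL a p.2).length
        · rw [if_pos h] at hB ⊢
          rw [Option.some_inj] at hB
          rw [hB]
          exact ih (d.insert j p.1) (j + 1) ⟨k' + 1, by rw [hje]; push_cast; ring⟩
        · rw [if_neg h] at hB; exact absurd hB (by simp)
  exact congrArg Prod.fst (hfold (PySem.List.enumerate w 0) PySem.Dict.empty 0 ⟨0, rfl⟩)
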